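-- pv_equiv track=rewrite | github.com/choijaehoon1/programmers_level | src/test90.py | solution
-- ===== SOURCE A (Python) =====
-- def binary(x):
--     tmp = ''
--     while x > 0:
--         n = x % 2
--         x //= 2
--         tmp = str(n) + tmp
--     return tmp
--
-- def solution(n, arr1, arr2):
--     answer = []
--     tmp_list = [['#']*n for _ in range(n)]
--     new_arr1 = []
--     new_arr2 = []
--     for i in arr1:
--         num = binary(i)
--         if len(num) != n:
--             cnt = n - len(num)
--             for j in range(cnt):
--                 num = '0' + num
--         new_arr1.append(list(num))
--
--     for i in arr2:
--         num = binary(i)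
--         if len(num) != n:
--             cnt = n - len(num)
--             for j in range(cnt):
--                 num = '0' + num
--         new_arr2.append(list(num))
--
--     for i in range(n):
--         for j in range(n):
--             if new_arr1[i][j] == '0':
--                 new_arr1[i][j] = ''
--             elif new_arr1[i][j] == '1':
--                 new_arr1[i][j] = '#'
--
--     for i in range(n):
--         for j in range(n):
--             if new_arr2[i][j] == '0':
--                 new_arr2[i][j] = ''
--             elif new_arr2[i][j] == '1':
--                 new_arr2[i][j] = '#'
--
--     for i in range(n):
--         for j in range(n):
--             if new_arr1[i][j] == '' and new_arr2[i][j] == '':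
--                 tmp_list[i][j] = ''
--
--     for i in tmp_list:
--         tmp = ''
--         for j in i:
--             if j == '':
--                 tmp += ' '
--             else:
--                 tmp += j
--         answer.append(tmp)
--
--     return answer
-- ===== SOURCE B (Python) =====
-- def solution(n, arr1, arr2):
--     def render(v):
--         return (format(v, 'b') if v > 0 else '').zfill(n)
--     rows = [(render(arr1[i]), render(arr2[i])) for i in range(n)]
--     return [''.join('#' if s1[j] == '1' or s2[j] == '1' else ' ' for j in range(n))
--             for s1, s2 in rows]
-- ===== Notes on version B (the rewrite author's own statement) =====
-- stated objective: simpler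
-- what changed: Replaces A's hand-rolled binary() loop, manual padding loops, two char-rewriting matrix passes, an overlay pass over a prebuilt '#'-matrix and a join loop by two comprehensions: per row a zfill'd binary rendering of each value and one character-wise OR join; no intermediate matrices are built or mutated.
import Mathlib
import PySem

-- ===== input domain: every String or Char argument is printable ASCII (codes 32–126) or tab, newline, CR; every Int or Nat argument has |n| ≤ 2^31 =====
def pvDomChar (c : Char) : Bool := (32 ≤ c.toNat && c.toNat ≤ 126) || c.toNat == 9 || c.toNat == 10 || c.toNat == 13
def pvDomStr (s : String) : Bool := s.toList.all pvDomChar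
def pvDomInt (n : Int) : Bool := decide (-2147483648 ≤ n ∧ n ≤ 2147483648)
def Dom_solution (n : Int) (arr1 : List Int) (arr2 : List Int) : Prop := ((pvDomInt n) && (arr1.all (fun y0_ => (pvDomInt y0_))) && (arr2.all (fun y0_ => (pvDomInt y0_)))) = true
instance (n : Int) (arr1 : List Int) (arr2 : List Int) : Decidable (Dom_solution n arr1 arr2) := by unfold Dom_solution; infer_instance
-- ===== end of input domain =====

-- B renders each secret-map row directly: a zfill'd binary rendering of each value and one
-- character-wise OR join per row (objective: simpler). Equality proved on Pre_: at least n
-- values in each array (exactly where A returns instead of raising IndexError).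


-- ===== PORT A =====
-- the while-loop of binary() as structural recursion on its state (x, tmp)
def binaryA (x : Int) (tmp : String) : String :=
  if 0 < x then
    binaryA (PySem.Int.floordiv x 2) (PySem.Int.toStr (PySem.Int.mod x 2) ++ tmp)
  else tmp
termination_by x.toNat
decreasing_by
  rw [PySem.Int.floordiv_eq_ediv_of_pos (by omega)]
  omega

-- "if len(num) != n: for j in range(n - len(num)): num = '0' + num"
def padNumA (n : Int) (num : String) : String :=
  if PySem.Str.len num ≠ n then
    (PySem.List.pyRange 0 (n - PySem.Str.len num) 1).foldl (fun acc _ => "0" ++ acc) num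
  else num

-- "new_arr.append(list(num))" for one value
def toRowA (n : Int) (i : Int) : List String :=
  (padNumA n (binaryA i "")).toList.map (fun c => String.ofList [c])

-- the '0' -> '', '1' -> '#' cell rewrite (branch order as in A)
def digitMapA (c : String) : String := if c = "0" then "" else if c = "1" then "#" else c

-- "for i in range(n): for j in range(n): …" in-place cell rewrite
def mapDigitsA (n : Int) (m : List (List String)) : List (List String) :=
  (PySem.List.pyRange 0 n 1).foldl (fun m i =>
    (PySem.List.pyRange 0 n 1).foldl (fun m j =>
      m.modify i.toNat (fun row => row.modify j.toNat digitMapA)) m) m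

def solution (n : Int) (arr1 : List Int) (arr2 : List Int) : List String :=
  let tmp0 := List.replicate n.toNat (List.replicate n.toNat "#")
  let na1 := mapDigitsA n (arr1.map (toRowA n))
  let na2 := mapDigitsA n (arr2.map (toRowA n))
  -- reading new_arr1[i][j] is ported with getD: exact on Pre_, where i and j are in range
  let tmp1 := (PySem.List.pyRange 0 n 1).foldl (fun t i =>
    (PySem.List.pyRange 0 n 1).foldl (fun t j =>
      if (na1.getD i.toNat []).getD j.toNat "" = "" ∧ (na2.getD i.toNat []).getD j.toNat "" = ""
      then t.modify i.toNat (fun row => row.set j.toNat "") else t) t) tmp0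
  tmp1.map (fun row => row.foldl (fun tmp c => tmp ++ (if c = "" then " " else c)) "")

-- ===== PORT B =====
-- "(format(v, 'b') if v > 0 else '').zfill(n)"  (format(v,'b') = PySem.Int.toBinChars)
def renderB (n : Int) (v : Int) : List Char :=
  let s := if 0 < v then PySem.Int.toBinChars v else []
  List.replicate (n.toNat - s.length) '0' ++ s

def solution_alt (n : Int) (arr1 : List Int) (arr2 : List Int) : List String :=
  -- arr1[i]/arr2[i] ported with pyGetD: exact on Pre_, where i < len
  let rows := (PySem.List.pyRange 0 n 1).map (fun i =>
    (renderB n (PySem.List.pyGetD arr1 i 0), renderB n (PySem.List.pyGetD arr2 i 0)))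
  -- s1[j]/s2[j] ported with getD: always in range, zfill'd strings have length ≥ n
  rows.map (fun p =>
    String.ofList ((PySem.List.pyRange 0 n 1).map (fun j =>
      if p.1.getD j.toNat '0' = '1' ∨ p.2.getD j.toNat '0' = '1' then '#' else ' ')))

-- ===== PRECONDITION & SPEC =====
-- Pre_ is exactly where A returns: with fewer than n values in either array (and 0 < n) A's
-- matrix passes raise IndexError (and B's arr[i] raises identically); nothing else is excluded.
def Pre_solution (n : Int) (arr1 : List Int) (arr2 : List Int) : Prop :=
  n ≤ (arr1.length : Int) ∧ n ≤ (arr2.length : Int)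
instance (n : Int) (arr1 : List Int) (arr2 : List Int) : Decidable (Pre_solution n arr1 arr2) := by unfold Pre_solution; infer_instance

def pvWitness_solution : Int × List Int × List Int := (2, [2, 1], [1, 3])

def Spec_solution (n : Int) (arr1 : List Int) (arr2 : List Int) (out : List String) : Prop := out = solution_alt n arr1 arr2
instance (n : Int) (arr1 : List Int) (arr2 : List Int) (out : List String) : Decidable (Spec_solution n arr1 arr2 out) := by unfold Spec_solution; infer_instance

-- ===== CLAIM (what is proved, stated in full; the proofs are below) =====
def Claim_equal_solution : Prop := ∀ (n : Int) (arr1 : List Int) (arr2 : List Int), Dom_solution n arr1 arr2 → Pre_solution n arr1 arr2 → Spec_solution n arr1 arr2 (solution n arr1 arr2)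

-- ===== LEMMAS AND PROOFS =====

-- binary digits of a natural number, most significant first ('' for 0)
def bits : Nat → List Char
  | 0 => []
  | v + 1 => bits ((v + 1) / 2) ++ [if (v + 1) % 2 = 1 then '1' else '0']
decreasing_by omega

-- the digit list A's binary() produces for an arbitrary Int ('' for v ≤ 0)
def bitsI (v : Int) : List Char := if 0 < v then bits v.toNat else []

-- that list zero-padded on the left to length ≥ n (what both programs index with j < n)
def padC (n : Int) (v : Int) : List Char :=
  List.replicate (n.toNat - (bitsI v).length) '0' ++ bitsI v

theorem bits_succ (v : Nat) (hv : 0 < v) :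
    bits v = bits (v / 2) ++ [if v % 2 = 1 then '1' else '0'] := by
  cases v with
  | zero => omega
  | succ v => rw [bits]

theorem bits_chars (v : Nat) : ∀ c ∈ bits v, c = '0' ∨ c = '1' := by
  induction v using Nat.strong_induction_on with
  | _ v ih =>
    intro c hc
    rcases Nat.eq_zero_or_pos v with rfl | hv
    · simp [bits] at hc
    · rw [bits_succ v hv] at hc
      rcases List.mem_append.mp hc with h | h
      · exact ih (v / 2) (by omega) c h
      · simp at h
        subst h
        split <;> simp

theorem padC_chars (n : Int) (v : Int) : ∀ c ∈ padC n v, c = '0' ∨ c = '1' := by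
  intro c hc
  rcases List.mem_append.mp hc with h | h
  · left
    exact List.eq_of_mem_replicate h
  · unfold bitsI at h
    split at h
    · exact bits_chars _ c h
    · simp at h

theorem binaryA_eq (v : Nat) (acc : String) :
    (binaryA (v : Int) acc).toList = bits v ++ acc.toList := by
  induction v using Nat.strong_induction_on generalizing acc with
  | _ v ih =>
    rw [binaryA]
    by_cases hv : 0 < v
    · have h0 : (0 : Int) < (v : Int) := by exact_mod_cast hv
      rw [if_pos h0]
      have hfd : PySem.Int.floordiv (v : Int) 2 = ((v / 2 : Nat) : Int) := by
        exact_mod_cast PySem.Int.floordiv_natCast v 2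
      have hmd : PySem.Int.mod (v : Int) 2 = ((v % 2 : Nat) : Int) := by
        exact_mod_cast PySem.Int.mod_natCast v 2
      rw [hfd, hmd, ih (v / 2) (by omega)]
      rw [bits_succ v hv, List.append_assoc]
      congr 1
      have h2 : v % 2 = 0 ∨ v % 2 = 1 := by omega
      rcases h2 with h | h <;> simp [h, String.toList_append, PySem.Int.toStr] <;> rfl
    · have h0 : ¬ ((0 : Int) < (v : Int)) := by exact_mod_cast hv
      rw [if_neg h0]
      have : v = 0 := by omega
      simp [this, bits]

-- Nat.toDigits 2 (used by PySem.Int.toBinChars = format(v,'b')) produces exactly `bits`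
theorem toDigitsCore_eq_bits (fuel : Nat) : ∀ (v : Nat) (ds : List Char), 0 < v → v < fuel →
    Nat.toDigitsCore 2 fuel v ds = bits v ++ ds := by
  induction fuel with
  | zero => intro v ds h1 h2; omega
  | succ fuel ih =>
    intro v ds h1 h2
    rw [Nat.toDigitsCore]
    by_cases hz : v / 2 = 0
    · rw [if_pos hz]
      have : v = 1 := by omega
      subst this
      rw [bits_succ 1 (by omega)]
      simp [bits, Nat.digitChar]
    · rw [if_neg hz]
      rw [ih (v / 2) _ (by omega) (by omega)]
      rw [bits_succ v h1, List.append_assoc]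
      congr 1
      have h2 : v % 2 = 0 ∨ v % 2 = 1 := by omega
      rcases h2 with h | h <;> simp [h, Nat.digitChar]

theorem toDigits_eq_bits (v : Nat) :
    Nat.toDigits 2 v = if v = 0 then ['0'] else bits v := by
  rcases Nat.eq_zero_or_pos v with rfl | hv
  · rfl
  · rw [if_neg (by omega), Nat.toDigits, toDigitsCore_eq_bits (v + 1) v [] hv (by omega)]
    simp

-- the "for j in range(cnt): num = '0' + num" loop
theorem foldl_prepend_zero (l : List Int) (s : String) :
    ((l.foldl (fun acc _ => "0" ++ acc) s)).toList = List.replicate l.length '0' ++ s.toList := by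
  induction l generalizing s with
  | nil => simp
  | cons x xs ih =>
    simp only [List.foldl_cons, ih, String.toList_append, List.length_cons]
    rw [List.replicate_succ']
    simp

theorem padNumA_toList (n : Int) (s : String) :
    (padNumA n s).toList = List.replicate (n.toNat - s.toList.length) '0' ++ s.toList := by
  unfold padNumA
  by_cases he : PySem.Str.len s ≠ n
  · rw [if_pos he, foldl_prepend_zero]
    congr 2
    rw [PySem.List.length_pyRange_one]
    simp [PySem.Str.len]
  · rw [if_neg he]
    simp only [PySem.Str.len, ne_eq, not_not] at he
    have h0 : n.toNat - s.toList.length = 0 := by omega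
    rw [h0, List.replicate_zero, List.nil_append]

-- toRowA: the row for value v is the padded digit rendering, one char per cell
theorem toRowA_eq (n : Int) (v : Int) :
    toRowA n v = (padC n v).map (fun c => String.ofList [c]) := by
  unfold toRowA padC
  have h1 : (binaryA v "").toList = bitsI v := by
    unfold bitsI
    by_cases hv : 0 < v
    · rw [if_pos hv]
      obtain ⟨m, rfl⟩ := Int.eq_ofNat_of_zero_le (le_of_lt hv)
      simpa using binaryA_eq m ""
    · rw [if_neg hv]
      rw [binaryA, if_neg hv]
      rfl
  have h2 := padNumA_toList n (binaryA v "")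
  rw [h1] at h2
  rw [h2]

-- B's rendering is the same padded digit list
theorem renderB_eq_padC (n : Int) (v : Int) : renderB n v = padC n v := by
  unfold renderB padC bitsI
  by_cases hv : 0 < v
  · rw [if_pos hv, if_pos hv]
    have ht : PySem.Int.toBinChars v = bits v.toNat := by
      unfold PySem.Int.toBinChars
      rw [if_neg (by omega), toDigits_eq_bits, if_neg (by omega)]
    rw [ht]
  · rw [if_neg hv, if_neg hv]

theorem padC_length (n : Int) (v : Int) : n.toNat ≤ (padC n v).length := by
  unfold padC
  simp
  omega

-- generic loop-shape lemmas for the index-directed in-place loops --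

theorem modify_modify_same {α : Type} (l : List α) (i : Nat) (f g : α → α) :
    (l.modify i f).modify i g = l.modify i (fun x => g (f x)) := by
  apply List.ext_getElem
  · simp
  · intro k h1 h2
    simp only [List.getElem_modify]
    split <;> simp_all

theorem foldl_modify_commute {α β : Type} (l : List β) (i : Nat) (G : β → α → α) (t : List α) :
    l.foldl (fun t b => t.modify i (G b)) t = t.modify i (fun x => l.foldl (fun x b => G b x) x) := by
  induction l generalizing t with
  | nil =>
    simp only [List.foldl_nil]
    apply List.ext_getElem
    · simp
    · intro k h1 h2
      simp only [List.getElem_modify]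
      split <;> rfl
  | cons b bs ih =>
    simp only [List.foldl_cons, ih, modify_modify_same]

-- "for j in range(N): xs[j] = F j xs[j]"
theorem foldl_range_modify {α : Type} (N : Nat) (F : Nat → α → α) (t : List α) :
    (List.range N).foldl (fun t j => t.modify j (F j)) t
      = t.mapIdx (fun j x => if j < N then F j x else x) := by
  induction N generalizing t with
  | zero =>
    apply List.ext_getElem <;> simp
  | succ N ih =>
    rw [List.range_succ, List.foldl_append, ih]
    apply List.ext_getElem
    · simp
    · intro k h1 h2
      simp only [List.foldl_cons, List.foldl_nil, List.getElem_modify, List.getElem_mapIdx]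
      rcases Nat.lt_trichotomy k N with h | h | h
      · rw [if_neg (by omega), if_pos h, if_pos (by omega)]
      · subst h
        rw [if_pos rfl, if_neg (by omega), if_pos (by omega)]
      · rw [if_neg (by omega), if_neg (by omega), if_neg (by omega)]

theorem pyRange_foldl_toNat {α : Type} (n : Int) (body : α → Nat → α) (t : α) :
    (PySem.List.pyRange 0 n 1).foldl (fun t i => body t i.toNat) t
      = (List.range n.toNat).foldl body t := by
  rw [PySem.List.pyRange_one, List.foldl_map]
  norm_num

theorem if_modify_push {α : Type} (c : Prop) [Decidable c] (t : List α) (i : Nat) (f : α → α) :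
    (if c then t.modify i f else t) = t.modify i (fun x => if c then f x else x) := by
  split
  · rfl
  · apply List.ext_getElem
    · simp
    · intro k h1 h2
      simp only [List.getElem_modify]
      split <;> rfl

theorem mapDigitsA_eq (n : Int) (m : List (List String)) :
    mapDigitsA n m = m.mapIdx (fun i row =>
      if i < n.toNat then row.mapIdx (fun j x => if j < n.toNat then digitMapA x else x) else row) := by
  unfold mapDigitsA
  have inner : ∀ (mm : List (List String)) (i : Int),
      (PySem.List.pyRange 0 n 1).foldl (fun m j =>
        m.modify i.toNat (fun row => row.modify j.toNat digitMapA)) mm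
      = mm.modify i.toNat (fun row =>
          row.mapIdx (fun j x => if j < n.toNat then digitMapA x else x)) := by
    intro mm i
    rw [foldl_modify_commute (PySem.List.pyRange 0 n 1) i.toNat
        (fun j row => row.modify j.toNat digitMapA) mm]
    congr 1
    funext row
    rw [pyRange_foldl_toNat n (fun r j => r.modify j digitMapA) row,
        foldl_range_modify n.toNat (fun _ => digitMapA) row]
  have hfun : (fun (mm : List (List String)) (i : Int) =>
      (PySem.List.pyRange 0 n 1).foldl (fun m j =>
        m.modify i.toNat (fun row => row.modify j.toNat digitMapA)) mm)
      = fun mm i => mm.modify i.toNat (fun row =>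
          row.mapIdx (fun j x => if j < n.toNat then digitMapA x else x)) := by
    funext mm i
    exact inner mm i
  rw [hfun]
  rw [pyRange_foldl_toNat n (fun mm i => mm.modify i (fun row =>
        row.mapIdx (fun j x => if j < n.toNat then digitMapA x else x))) m]
  rw [foldl_range_modify n.toNat (fun _ row =>
        row.mapIdx (fun j x => if j < n.toNat then digitMapA x else x)) m]

-- the join loop over a row whose cells are all "" or "#"
theorem join_row_eq (row : List String) (acc : String)
    (h : ∀ c ∈ row, c = "" ∨ c = "#") :
    (row.foldl (fun tmp c => tmp ++ (if c = "" then " " else c)) acc).toList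
      = acc.toList ++ row.map (fun c => if c = "" then ' ' else '#') := by
  induction row generalizing acc with
  | nil => simp
  | cons c cs ih =>
    simp only [List.foldl_cons, List.map_cons]
    rw [ih _ (fun d hd => h d (by simp [hd]))]
    rcases h c (by simp) with rfl | rfl <;> simp [String.toList_append]

-- the common canonical value: row i, char j = '#' iff digit j of the padded rendering
-- of arr1[i] or of arr2[i] is '1'
def canon (n : Int) (arr1 : List Int) (arr2 : List Int) : List String :=
  (List.range n.toNat).map (fun i =>
    String.ofList ((List.range n.toNat).map (fun j =>
      if (padC n (arr1.getD i 0)).getD j '0' = '1'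
         ∨ (padC n (arr2.getD i 0)).getD j '0' = '1' then '#' else ' ')))

theorem modify_id {α : Type} (l : List α) (i : Nat) : l.modify i (fun x => x) = l := by
  apply List.ext_getElem
  · simp
  · intro k h1 h2
    simp only [List.getElem_modify]
    split <;> rfl

theorem set_if_push {α : Type} (c : Prop) [Decidable c] (t : List (List α)) (i j : Nat) (v : α) :
    (if c then t.modify i (fun row => row.set j v) else t)
      = t.modify i (fun row => row.modify j (fun x => if c then v else x)) := by
  rw [if_modify_push]
  by_cases hc : c
  · simp only [if_pos hc]
    congr 1
    funext row
    exact List.set_eq_modify v j row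
  · simp only [if_neg hc]
    congr 1
    funext row
    exact (modify_id row j).symm

-- one cell of new_arr after the digit-rewrite pass, under Pre_
theorem cell_eq (n : Int) (arr : List Int) (hlen : n ≤ (arr.length : Int))
    (i j : Nat) (hi : i < n.toNat) (hj : j < n.toNat) :
    ((mapDigitsA n (arr.map (toRowA n))).getD i []).getD j ""
      = if (padC n (arr.getD i 0)).getD j '0' = '1' then "#" else "" := by
  have hilen : i < arr.length := by omega
  rw [mapDigitsA_eq]
  have hl1 : i < (List.mapIdx (fun i row =>
      if i < n.toNat then row.mapIdx (fun j x => if j < n.toNat then digitMapA x else x) else row)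
      (arr.map (toRowA n))).length := by
    simpa using hilen
  rw [List.getD_eq_getElem _ _ hl1, List.getElem_mapIdx]
  rw [List.getElem_map, toRowA_eq n arr[i], if_pos hi]
  have hjp : j < (padC n arr[i]).length := by
    have := padC_length n arr[i]
    omega
  have hl2 : j < (((padC n arr[i]).map (fun c => String.ofList [c])).mapIdx
      (fun j x => if j < n.toNat then digitMapA x else x)).length := by
    simpa using hjp
  rw [List.getD_eq_getElem _ _ hl2, List.getElem_mapIdx, if_pos hj, List.getElem_map]
  rw [List.getD_eq_getElem arr 0 hilen, List.getD_eq_getElem _ _ hjp]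
  rcases padC_chars n arr[i] ((padC n arr[i])[j]) (List.getElem_mem _) with h | h <;>
    rw [h] <;> rfl

theorem alt_eq_canon (n : Int) (arr1 arr2 : List Int) (hpre : Pre_solution n arr1 arr2) :
    solution_alt n arr1 arr2 = canon n arr1 arr2 := by
  obtain ⟨h1, h2⟩ := hpre
  unfold solution_alt canon
  simp only [PySem.List.pyRange_one, List.map_map, sub_zero, renderB_eq_padC]
  apply List.map_congr_left
  intro k _
  simp only [Function.comp_apply, zero_add, PySem.List.pyGetD_natCast]
  congr 1

theorem solution_eq_canon (n : Int) (arr1 arr2 : List Int) (hpre : Pre_solution n arr1 arr2) :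
    solution n arr1 arr2 = canon n arr1 arr2 := by
  obtain ⟨h1, h2⟩ := hpre
  unfold solution
  simp only
  -- the overlay double loop
  have hov :
      (PySem.List.pyRange 0 n 1).foldl (fun t i =>
        (PySem.List.pyRange 0 n 1).foldl (fun t j =>
          if ((mapDigitsA n (arr1.map (toRowA n))).getD i.toNat []).getD j.toNat "" = ""
             ∧ ((mapDigitsA n (arr2.map (toRowA n))).getD i.toNat []).getD j.toNat "" = ""
          then t.modify i.toNat (fun row => row.set j.toNat "") else t) t)
        (List.replicate n.toNat (List.replicate n.toNat "#"))
      = (List.replicate n.toNat (List.replicate n.toNat "#")).mapIdx (fun i row =>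
          if i < n.toNat then row.mapIdx (fun j x => if j < n.toNat then
            (if ((mapDigitsA n (arr1.map (toRowA n))).getD i []).getD j "" = ""
                ∧ ((mapDigitsA n (arr2.map (toRowA n))).getD i []).getD j "" = ""
             then "" else x) else x) else row) := by
    have hinner : ∀ (t : List (List String)) (i : Int),
        (PySem.List.pyRange 0 n 1).foldl (fun t j =>
          if ((mapDigitsA n (arr1.map (toRowA n))).getD i.toNat []).getD j.toNat "" = ""
             ∧ ((mapDigitsA n (arr2.map (toRowA n))).getD i.toNat []).getD j.toNat "" = ""
          then t.modify i.toNat (fun row => row.set j.toNat "") else t) t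
        = t.modify i.toNat (fun row => row.mapIdx (fun j x => if j < n.toNat then
            (if ((mapDigitsA n (arr1.map (toRowA n))).getD i.toNat []).getD j "" = ""
                ∧ ((mapDigitsA n (arr2.map (toRowA n))).getD i.toNat []).getD j "" = ""
             then "" else x) else x)) := by
      intro t i
      have hbody : (fun (t : List (List String)) (j : Int) =>
          if ((mapDigitsA n (arr1.map (toRowA n))).getD i.toNat []).getD j.toNat "" = ""
             ∧ ((mapDigitsA n (arr2.map (toRowA n))).getD i.toNat []).getD j.toNat "" = ""
          then t.modify i.toNat (fun row => row.set j.toNat "") else t)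
          = fun t j => t.modify i.toNat (fun row => row.modify j.toNat (fun x =>
              if ((mapDigitsA n (arr1.map (toRowA n))).getD i.toNat []).getD j.toNat "" = ""
                 ∧ ((mapDigitsA n (arr2.map (toRowA n))).getD i.toNat []).getD j.toNat "" = ""
              then "" else x)) := by
        funext t j
        exact set_if_push _ t i.toNat j.toNat ""
      rw [hbody]
      rw [foldl_modify_commute (PySem.List.pyRange 0 n 1) i.toNat
          (fun j row => row.modify j.toNat (fun x =>
            if ((mapDigitsA n (arr1.map (toRowA n))).getD i.toNat []).getD j.toNat "" = ""
               ∧ ((mapDigitsA n (arr2.map (toRowA n))).getD i.toNat []).getD j.toNat "" = ""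
            then "" else x)) t]
      congr 1
      funext row
      rw [PySem.List.pyRange_one, List.foldl_map]
      simp only [zero_add, Int.toNat_natCast, sub_zero]
      exact foldl_range_modify n.toNat _ row
    have hfun : (fun (t : List (List String)) (i : Int) =>
        (PySem.List.pyRange 0 n 1).foldl (fun t j =>
          if ((mapDigitsA n (arr1.map (toRowA n))).getD i.toNat []).getD j.toNat "" = ""
             ∧ ((mapDigitsA n (arr2.map (toRowA n))).getD i.toNat []).getD j.toNat "" = ""
          then t.modify i.toNat (fun row => row.set j.toNat "") else t) t)
        = fun t i => t.modify i.toNat (fun row => row.mapIdx (fun j x => if j < n.toNat then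
            (if ((mapDigitsA n (arr1.map (toRowA n))).getD i.toNat []).getD j "" = ""
                ∧ ((mapDigitsA n (arr2.map (toRowA n))).getD i.toNat []).getD j "" = ""
             then "" else x) else x)) := by
      funext t i
      exact hinner t i
    rw [hfun, PySem.List.pyRange_one, List.foldl_map]
    simp only [zero_add, Int.toNat_natCast, sub_zero]
    exact foldl_range_modify n.toNat _ _
  rw [hov]
  -- now compare row by row with canon
  apply List.ext_getElem
  · simp [canon]
  · intro i hiL hiR
    have hi : i < n.toNat := by simpa [canon] using hiR
    rw [List.getElem_map, List.getElem_mapIdx, List.getElem_replicate, if_pos (by simpa using hi)]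
    have hrow : (List.replicate n.toNat "#").mapIdx (fun j x => if j < n.toNat then
          (if ((mapDigitsA n (arr1.map (toRowA n))).getD i []).getD j "" = ""
              ∧ ((mapDigitsA n (arr2.map (toRowA n))).getD i []).getD j "" = ""
           then "" else x) else x)
        = (List.range n.toNat).map (fun j =>
            if ¬ (padC n (arr1.getD i 0)).getD j '0' = '1'
               ∧ ¬ (padC n (arr2.getD i 0)).getD j '0' = '1' then "" else "#") := by
      apply List.ext_getElem
      · simp
      · intro j hj1 hj2
        have hj : j < n.toNat := by simpa using hj1
        rw [List.getElem_mapIdx, List.getElem_replicate, if_pos hj, List.getElem_map,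
            List.getElem_range]
        rw [cell_eq n arr1 h1 i j hi hj, cell_eq n arr2 h2 i j hi hj]
        by_cases hb1 : (padC n (arr1.getD i 0)).getD j '0' = '1' <;>
          by_cases hb2 : (padC n (arr2.getD i 0)).getD j '0' = '1' <;>
          simp only [hb1, hb2] <;> simp
    rw [hrow]
    apply String.toList_inj.mp
    rw [join_row_eq _ "" (by
      intro c hc
      rw [List.mem_map] at hc
      obtain ⟨j, hj, rfl⟩ := hc
      split <;> simp)]
    have hcanL : (canon n arr1 arr2)[i]'hiR
        = String.ofList ((List.range n.toNat).map (fun j =>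
            if (padC n (arr1.getD i 0)).getD j '0' = '1'
               ∨ (padC n (arr2.getD i 0)).getD j '0' = '1' then '#' else ' ')) := by
      unfold canon
      rw [List.getElem_map, List.getElem_range]
    rw [hcanL]
    simp only [String.toList_ofList, List.map_map]
    apply List.map_congr_left
    intro j _
    simp only [Function.comp_apply]
    by_cases hb1 : (padC n (arr1.getD i 0)).getD j '0' = '1' <;>
      by_cases hb2 : (padC n (arr2.getD i 0)).getD j '0' = '1' <;>
      simp only [hb1, hb2] <;> simp

-- ===== VERDICT (by name: the statement is the Claim_ definition above) =====
theorem solution_spec : Claim_equal_solution := by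
  intro n arr1 arr2 _ hpre
  unfold Spec_solution
  rw [solution_eq_canon n arr1 arr2 hpre, alt_eq_canon n arr1 arr2 hpre]
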